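-- pv_equiv track=rewrite | github.com/Prometh3uSss/calculo-numerico | src/utilidades/normalizador.py | normalizeDecimalNumber
-- ===== SOURCE A (Python) =====
-- def normalizeDecimalNumber(inputValue: str) -> str:
--     """
--     Normaliza un número decimal a notación científica.
--     Ejemplos:
--     "123.45" -> "1.2345 × 10^2"
--     "-0.00123" -> "-1.23 × 10^{-3}"
--     "+1000" -> "1 × 10^3"
--
--     Args:
--         inputValue: Cadena con número decimal
--
--     Returns:
--         Representación en notación científica
--
--     Raises:
--         ValueError: Si el formato es inválido
--     """
--     # Validar entrada
--     if not inputValue or not isinstance(inputValue, str):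
--         raise ValueError("Valor de entrada inválido")
--
--     # Manejar signo
--     signCharacter = ''
--     if inputValue.startswith('-'):
--         signCharacter = '-'
--         processedValue = inputValue[1:]
--     elif inputValue.startswith('+'):
--         processedValue = inputValue[1:]
--     else:
--         processedValue = inputValue
--
--     # Normalizar formato (comas a puntos, eliminar espacios)
--     processedValue = processedValue.replace(',', '.').replace(' ', '')
--
--     # Caso especial: cero
--     if all(char in '0.,' for char in processedValue):
--         return "0"
--
--     # Dividir en parte entera y decimal
--     parts = processedValue.split('.')
--     integerPart = parts[0].lstrip('0') or '0'
--
--     if len(parts) > 1: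
--         fractionalPart = parts[1]
--     else:
--         fractionalPart = ""
--
--     # Combinar todos los dígitos significativos
--     significantDigits = integerPart + fractionalPart
--     significantDigits = significantDigits.lstrip('0') or '0'
--
--     # Manejar caso donde no hay dígitos significativos
--     if significantDigits == '0':
--         return "0"
--
--     # Determinar exponente
--     if integerPart != '0':
--         exponentValue = len(integerPart) - 1
--         mantissaValue = significantDigits[0] + '.' + significantDigits[1:]
--     else:
--         # Buscar primer dígito no cero en decimal
--         for index, char in enumerate(fractionalPart):
--             if char != '0':
--                 exponentValue = -(index + 1)
--                 mantissaValue = fractionalPart[index] + '.' + fractionalPart[index+1:]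
--                 break
--
--     # Limpiar mantisa (quitar ceros finales)
--     if '.' in mantissaValue:
--         mantissaValue = mantissaValue.rstrip('0').rstrip('.')
--
--     return f"{signCharacter}{mantissaValue} × 10^{exponentValue}"
-- ===== SOURCE B (Python) =====
-- def normalizeDecimalNumber(inputValue: str) -> str:
--     """Same normalization via one unified first-significant-digit scan (no integer-vs-fractional branch)."""
--     if not inputValue or not isinstance(inputValue, str):
--         raise ValueError("Valor de entrada inválido")
--     signCharacter = ''
--     processedValue = inputValue
--     if processedValue.startswith('-'):
--         signCharacter = '-'
--         processedValue = processedValue[1:]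
--     elif processedValue.startswith('+'):
--         processedValue = processedValue[1:]
--     processedValue = processedValue.replace(',', '.').replace(' ', '')
--     if all(char in '0.,' for char in processedValue):
--         return "0"
--     parts = processedValue.split('.')
--     fractionalPart = parts[1] if len(parts) > 1 else ""
--     digits = parts[0] + fractionalPart
--     firstSignificant = next((i for i, c in enumerate(digits) if c != '0'), None)
--     if firstSignificant is None:
--         return "0"
--     exponentValue = len(parts[0]) - 1 - firstSignificant
--     mantissaValue = digits[firstSignificant] + '.' + digits[firstSignificant + 1:]
--     mantissaValue = mantissaValue.rstrip('0').rstrip('.')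
--     return f"{signCharacter}{mantissaValue} × 10^{exponentValue}"
-- ===== Notes on version B (the rewrite author's own statement) =====
-- stated objective: simpler
-- what changed: A's integer-vs-fractional two-branch analysis (stripped integer part vs an enumerate loop over the fractional part) is replaced by one unified scan: join integer and fractional digits, find the index of the first significant digit once, and compute exponent and mantissa from that index uniformly.
import Mathlib
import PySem

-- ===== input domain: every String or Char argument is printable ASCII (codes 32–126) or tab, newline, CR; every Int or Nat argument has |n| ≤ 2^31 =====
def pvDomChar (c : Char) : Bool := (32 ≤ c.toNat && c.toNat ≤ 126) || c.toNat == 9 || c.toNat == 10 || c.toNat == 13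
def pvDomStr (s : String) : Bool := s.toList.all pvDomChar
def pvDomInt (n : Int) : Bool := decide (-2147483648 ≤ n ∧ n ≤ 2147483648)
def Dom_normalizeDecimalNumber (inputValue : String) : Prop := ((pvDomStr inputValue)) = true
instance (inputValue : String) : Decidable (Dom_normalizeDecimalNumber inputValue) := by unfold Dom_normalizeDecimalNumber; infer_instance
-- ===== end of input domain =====

-- B replaces A's integer-vs-fractional two-branch analysis by one unified scan for the first
-- significant digit of the joined digit string (objective: simpler decomposition, same cost).

-- ===== PORT A =====
-- hand ports (exact on all inputs): str.lstrip('0') drops leading '0' chars;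
-- str.rstrip(c) drops trailing copies of the single char c.
def pvLstrip0 (cs : List Char) : List Char := cs.dropWhile (fun c => c == '0')
def pvRstrip (ch : Char) (cs : List Char) : List Char := (cs.reverse.dropWhile (fun c => c == ch)).reverse

-- shared stage, literally identical lines in both Pythons:
-- processedValue = processedValue.replace(',', '.').replace(' ', '')
def pvProcess (cs : List Char) : List Char :=
  PySem.Chars.replace (PySem.Chars.replace cs [','] ['.']) [' '] []

-- A's "for index, char in enumerate(fractionalPart): if char != '0': …; break" loop,
-- returning (exponentValue, mantissaValue) of the first non-'0' char (none = loop fell through)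
def aFracLoop : List Char → Nat → Option (Int × List Char)
  | [], _ => none
  | c :: rest, idx =>
    if c ≠ '0' then some (-((idx : Int) + 1), c :: '.' :: rest) else aFracLoop rest (idx + 1)

-- A's code from "integerPart = parts[0].lstrip('0') or '0'" on
def aTail (sign p0 fr : List Char) : String :=
  let integerPart := if pvLstrip0 p0 = [] then ['0'] else pvLstrip0 p0
  let sd0 := integerPart ++ fr
  let significantDigits := if pvLstrip0 sd0 = [] then ['0'] else pvLstrip0 sd0
  if significantDigits = ['0'] then "0"
  else
    let em :=
      if integerPart ≠ ['0'] then
        -- significantDigits[0] + '.' + significantDigits[1:]  (nonempty here, so take 1 is s[0])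
        some (((integerPart.length : Int) - 1),
              significantDigits.take 1 ++ '.' :: significantDigits.drop 1)
      else aFracLoop fr 0
    match em with
    | none => ""  -- unreachable: Python's mantissaValue would be unbound; proven never to occur
    | some (e, m) =>
      let m := if PySem.Chars.isIn ['.'] m then pvRstrip '.' (pvRstrip '0' m) else m
      String.ofList (sign ++ m ++ (" × 10^").toList ++ PySem.Int.toChars e)

-- A's code from "processedValue = processedValue.replace…" on (after the sign was handled)
def aAfterSign (sign rest : List Char) : String :=
  let processed := pvProcess rest
  if processed.all (fun c => PySem.Chars.isIn [c] ['0', '.', ',']) then "0"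
  else
    let parts := PySem.Chars.splitOn processed ['.']
    -- parts[0] (split always yields at least one piece); parts[1] guarded by len(parts) > 1
    aTail sign (parts.headD []) (if parts.length > 1 then parts.getD 1 [] else [])

def normalizeDecimalNumber (inputValue : String) : String :=
  let cs := inputValue.toList
  if PySem.Chars.startswith cs ['-'] then aAfterSign ['-'] (PySem.List.slice cs (some 1) none)
  else if PySem.Chars.startswith cs ['+'] then aAfterSign [] (PySem.List.slice cs (some 1) none)
  else aAfterSign [] cs

-- ===== PORT B =====
-- B's unified tail: one digit string, one scan for the first significant digit
def bTail (sign p0 fr : List Char) : String :=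
  let digits := p0 ++ fr
  -- next((i for i, c in enumerate(digits) if c != '0'), None)
  match digits.findIdx? (fun c => c ≠ '0') with
  | none => "0"
  | some i =>
    let e : Int := (p0.length : Int) - 1 - (i : Int)
    -- digits[firstSignificant] + '.' + digits[firstSignificant+1:]  (i a valid index here)
    let m := (digits.drop i).take 1 ++ '.' :: digits.drop (i + 1)
    let m := pvRstrip '.' (pvRstrip '0' m)
    String.ofList (sign ++ m ++ (" × 10^").toList ++ PySem.Int.toChars e)

def bAfterSign (sign rest : List Char) : String :=
  let processed := pvProcess rest
  if processed.all (fun c => PySem.Chars.isIn [c] ['0', '.', ',']) then "0"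
  else
    let parts := PySem.Chars.splitOn processed ['.']
    bTail sign (parts.headD []) (if parts.length > 1 then parts.getD 1 [] else [])

def normalizeDecimalNumber_alt (inputValue : String) : String :=
  let cs := inputValue.toList
  if PySem.Chars.startswith cs ['-'] then bAfterSign ['-'] (PySem.List.slice cs (some 1) none)
  else if PySem.Chars.startswith cs ['+'] then bAfterSign [] (PySem.List.slice cs (some 1) none)
  else bAfterSign [] cs

-- ===== PRECONDITION & SPEC =====
-- Pre_ excludes only the empty string, on which the Python A raises ValueError ("Valor de entrada inválido").
def Pre_normalizeDecimalNumber (inputValue : String) : Prop := inputValue ≠ ""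
instance (inputValue : String) : Decidable (Pre_normalizeDecimalNumber inputValue) := by
  unfold Pre_normalizeDecimalNumber; infer_instance
def pvWitness_normalizeDecimalNumber : String := "-0.00123"

def Spec_normalizeDecimalNumber (inputValue : String) (out : String) : Prop :=
  out = normalizeDecimalNumber_alt inputValue
instance (inputValue : String) (out : String) : Decidable (Spec_normalizeDecimalNumber inputValue out) := by
  unfold Spec_normalizeDecimalNumber; infer_instance

-- ===== CLAIM (what is proved, stated in full; the proofs are below) =====
def Claim_equal_normalizeDecimalNumber : Prop :=
  ∀ (inputValue : String), Dom_normalizeDecimalNumber inputValue →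
    Pre_normalizeDecimalNumber inputValue →
    Spec_normalizeDecimalNumber inputValue (normalizeDecimalNumber inputValue)

-- ===== LEMMAS AND PROOFS =====

lemma lstrip0_cons_zero (l : List Char) : pvLstrip0 ('0' :: l) = pvLstrip0 l := by
  simp [pvLstrip0]

lemma lstrip0_cons_ne (c : Char) (l : List Char) (hc : c ≠ '0') :
    pvLstrip0 (c :: l) = c :: l := by
  simp [pvLstrip0, hc]

-- lstrip('0') of a nonempty result starts with a non-'0' char
lemma lstrip0_shape : ∀ l : List Char, pvLstrip0 l ≠ [] →
    ∃ c t, pvLstrip0 l = c :: t ∧ c ≠ '0'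
  | [], h => absurd rfl h
  | c :: l, h => by
    by_cases hc : c = '0'
    · subst hc
      rw [lstrip0_cons_zero] at h ⊢
      exact lstrip0_shape l h
    · exact ⟨c, l, lstrip0_cons_ne c l hc, hc⟩

lemma lstrip0_append (l₁ l₂ : List Char) :
    pvLstrip0 (l₁ ++ l₂) = if pvLstrip0 l₁ = [] then pvLstrip0 l₂ else pvLstrip0 l₁ ++ l₂ := by
  simp [pvLstrip0, List.dropWhile_append, List.isEmpty_iff]

lemma lstrip0_length_le (l : List Char) : (pvLstrip0 l).length ≤ l.length :=
  List.length_dropWhile_le _ _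

lemma findIdx?_none_of_lstrip0_nil : ∀ l : List Char, pvLstrip0 l = [] →
    l.findIdx? (fun c => c ≠ '0') = none
  | [], _ => rfl
  | c :: l, h => by
    by_cases hc : c = '0'
    · subst hc
      rw [lstrip0_cons_zero] at h
      rw [List.findIdx?_cons, if_neg (by simp), findIdx?_none_of_lstrip0_nil l h]
      rfl
    · rw [lstrip0_cons_ne c l hc] at h
      simp at h

lemma findIdx?_some_of_lstrip0 : ∀ (l : List Char) (c : Char) (t : List Char),
    pvLstrip0 l = c :: t →
    ∃ i, l.findIdx? (fun c => c ≠ '0') = some i ∧ l.drop i = c :: t ∧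
      i + (t.length + 1) = l.length
  | [], c, t, h => by simp [pvLstrip0] at h
  | c₀ :: l, c, t, h => by
    by_cases hc : c₀ = '0'
    · subst hc
      rw [lstrip0_cons_zero] at h
      obtain ⟨i, hf, hd, hl⟩ := findIdx?_some_of_lstrip0 l c t h
      refine ⟨i + 1, ?_, by simpa using hd, by simp only [List.length_cons]; omega⟩
      rw [List.findIdx?_cons, if_neg (by simp), hf]
      rfl
    · rw [lstrip0_cons_ne c₀ l hc] at h
      obtain ⟨rfl, rfl⟩ : c₀ = c ∧ l = t := ⟨(List.cons.injEq .. ▸ h).1, (List.cons.injEq .. ▸ h).2⟩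
      refine ⟨0, ?_, by simp, by simp⟩
      rw [List.findIdx?_cons, if_pos (by simpa using hc)]

lemma aFracLoop_spec (c : Char) (t : List Char) : ∀ (l : List Char),
    pvLstrip0 l = c :: t → ∀ k : Nat,
    aFracLoop l k = some (-((k : Int) + (l.length : Int) - (t.length : Int)), c :: '.' :: t)
  | [], h => by simp [pvLstrip0] at h
  | c₀ :: l, h => by
    intro k
    by_cases hc : c₀ = '0'
    · subst hc
      rw [lstrip0_cons_zero] at h
      rw [aFracLoop, if_neg (by simp), aFracLoop_spec c t l h (k + 1)]
      have hle := lstrip0_length_le l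
      rw [h] at hle
      simp only [List.length_cons] at hle ⊢
      congr 2
      push_cast
      omega
    · rw [lstrip0_cons_ne c₀ l hc] at h
      obtain ⟨rfl, rfl⟩ : c₀ = c ∧ l = t := ⟨(List.cons.injEq .. ▸ h).1, (List.cons.injEq .. ▸ h).2⟩
      rw [aFracLoop, if_pos hc]
      congr 2
      simp only [List.length_cons]
      push_cast
      ring

lemma dot_isIn (c : Char) (y : List Char) : PySem.Chars.isIn ['.'] (c :: '.' :: y) = true := by
  rw [PySem.Chars.isIn_iff_infix]
  exact ⟨[c], y, by simp⟩

lemma tail_eq (sign p0 fr : List Char) : aTail sign p0 fr = bTail sign p0 fr := by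
  by_cases h0 : pvLstrip0 p0 = []
  · -- parts[0] is all zeros: integerPart = '0'
    by_cases hf : pvLstrip0 fr = []
    · -- no significant digit at all: both return "0"
      have hd : pvLstrip0 (p0 ++ fr) = [] := by rw [lstrip0_append, if_pos h0]; exact hf
      have hsd : pvLstrip0 (['0'] ++ fr) = [] := by
        rw [List.singleton_append, lstrip0_cons_zero]; exact hf
      rw [aTail, bTail]
      simp only [h0, if_true, findIdx?_none_of_lstrip0_nil _ hd, hsd]
    · obtain ⟨c, t, hct, hc⟩ := lstrip0_shape fr hf
      have hd : pvLstrip0 (p0 ++ fr) = c :: t := by rw [lstrip0_append, if_pos h0]; exact hct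
      obtain ⟨i, hfind, hdrop, hlen⟩ := findIdx?_some_of_lstrip0 _ _ _ hd
      have hsd : pvLstrip0 (['0'] ++ fr) = c :: t := by
        rw [List.singleton_append, lstrip0_cons_zero]; exact hct
      have hct0 : (c :: t : List Char) ≠ ['0'] := by
        intro he
        exact hc (List.cons.injEq .. ▸ he).1
      have hloop := aFracLoop_spec c t fr hct 0
      have hdrop1 : (p0 ++ fr).drop (i + 1) = t := by
        rw [← List.tail_drop, hdrop]
        rfl
      rw [aTail, bTail]
      simp only [h0, if_true, hsd, hfind, hloop, if_neg (List.cons_ne_nil c t), if_neg hct0,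
        if_neg (by simp : ¬((['0'] : List Char) ≠ ['0']))]
      rw [hdrop, hdrop1, if_pos (dot_isIn c t)]
      simp only [List.take_succ_cons, List.take_zero, List.singleton_append]
      have hfr := lstrip0_length_le fr
      rw [hct] at hfr
      simp only [List.length_append, List.length_cons] at hlen hfr
      congr 3
      push_cast [List.length_cons]
      omega
  · obtain ⟨c, t, hct, hc⟩ := lstrip0_shape p0 h0
    have hd : pvLstrip0 (p0 ++ fr) = c :: (t ++ fr) := by
      rw [lstrip0_append, if_neg h0, hct]
      rfl
    obtain ⟨i, hfind, hdrop, hlen⟩ := findIdx?_some_of_lstrip0 _ _ _ hd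
    have hip : pvLstrip0 ((c :: t) ++ fr) = c :: (t ++ fr) := by
      rw [List.cons_append, lstrip0_cons_ne _ _ hc]
    have hct0 : (c :: t : List Char) ≠ ['0'] := by
      intro he
      exact hc (List.cons.injEq .. ▸ he).1
    have hctf0 : (c :: (t ++ fr) : List Char) ≠ ['0'] := by
      intro he
      exact hc (List.cons.injEq .. ▸ he).1
    have hdrop1 : (p0 ++ fr).drop (i + 1) = t ++ fr := by
      rw [← List.tail_drop, hdrop]
      rfl
    rw [aTail, bTail]
    simp only [hct, if_neg (List.cons_ne_nil c t), hip, hfind,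
      if_neg (List.cons_ne_nil c (t ++ fr)), if_neg hctf0, if_pos hct0]
    rw [hdrop, hdrop1]
    simp only [List.take_succ_cons, List.take_zero, List.drop_succ_cons, List.drop_zero,
      List.singleton_append]
    rw [if_pos (dot_isIn c (t ++ fr))]
    have hp0 := lstrip0_length_le p0
    rw [hct] at hp0
    simp only [List.length_append, List.length_cons] at hlen hp0
    congr 3
    push_cast [List.length_cons]
    omega

lemma afterSign_eq (sign rest : List Char) : aAfterSign sign rest = bAfterSign sign rest := by
  rw [aAfterSign, bAfterSign]
  by_cases h : (pvProcess rest).all (fun c => PySem.Chars.isIn [c] ['0', '.', ',']) = true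
  · simp only [h, if_true]
  · simp only [if_neg h, tail_eq]

-- ===== VERDICT (by name: the statement is the Claim_ definition above) =====
theorem normalizeDecimalNumber_spec : Claim_equal_normalizeDecimalNumber := by
  intro s _ _
  unfold Spec_normalizeDecimalNumber normalizeDecimalNumber normalizeDecimalNumber_alt
  by_cases h1 : PySem.Chars.startswith s.toList ['-'] = true
  · simp only [h1, if_true, afterSign_eq]
  · by_cases h2 : PySem.Chars.startswith s.toList ['+'] = true
    · simp only [if_neg h1, h2, if_true, afterSign_eq]
    · simp only [if_neg h1, if_neg h2, afterSign_eq]
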